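-- pv_equiv track=rewrite | github.com/MariiaSam/python | tasks/types_of_data_high_1.py | days_to_reach_height
-- ===== SOURCE A (Python) =====
-- def days_to_reach_height(height, day_climb, night_descent):
--     current_height = 0
--     days = 0
--
--     while True:
--         days += 1
--         current_height += day_climb
--         if current_height >= height:
--             break
--         current_height -= night_descent
--
--     return days
-- ===== SOURCE B (Python) =====
-- def days_to_reach_height(height, day_climb, night_descent):
--     if height <= day_climb:
--         return 1
--     net = day_climb - night_descent
--     return -((-(height - day_climb)) // net) + 1
-- ===== Notes on version B (the rewrite author's own statement) =====
-- stated objective: simpler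
-- what changed: replaced the day-by-day simulation loop with a closed-form ceiling-division formula: 1 day if height <= day_climb, else ceil((height-day_climb)/(day_climb-night_descent)) + 1
import Mathlib
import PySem

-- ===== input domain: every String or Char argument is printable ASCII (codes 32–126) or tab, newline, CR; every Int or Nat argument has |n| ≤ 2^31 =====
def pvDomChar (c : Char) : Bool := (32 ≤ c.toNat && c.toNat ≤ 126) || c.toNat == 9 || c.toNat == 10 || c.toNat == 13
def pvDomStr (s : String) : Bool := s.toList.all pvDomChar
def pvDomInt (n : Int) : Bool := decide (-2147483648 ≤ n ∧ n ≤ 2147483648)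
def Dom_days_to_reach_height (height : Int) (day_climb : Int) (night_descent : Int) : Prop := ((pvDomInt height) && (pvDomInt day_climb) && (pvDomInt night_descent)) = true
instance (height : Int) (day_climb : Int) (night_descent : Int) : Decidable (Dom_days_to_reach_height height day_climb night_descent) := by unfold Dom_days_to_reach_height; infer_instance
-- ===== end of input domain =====

-- B replaces A's day-by-day simulation loop by a closed-form ceiling-division formula.

-- ===== PORT A =====
-- the 'while True' loop; fuel only guards totality (under Pre_ the loop terminates well within it)
def daysLoop (height : Int) (day_climb : Int) (night_descent : Int) : Nat → Int → Int → Int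
  | 0, _, days => days
  | n + 1, current_height, days =>
    let days' := days + 1
    let cur' := current_height + day_climb
    if cur' ≥ height then days'
    else daysLoop height day_climb night_descent n (cur' - night_descent) days'

def days_to_reach_height (height : Int) (day_climb : Int) (night_descent : Int) : Int :=
  daysLoop height day_climb night_descent ((height - day_climb).toNat + 2) 0 0

-- ===== PORT B =====
def days_to_reach_height_alt (height : Int) (day_climb : Int) (night_descent : Int) : Int :=
  if height ≤ day_climb then 1
  else
    let net := day_climb - night_descent;
    -(PySem.Int.floordiv (-(height - day_climb)) net) + 1

-- ===== PRECONDITION & SPEC =====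
-- Pre_ excludes exactly the inputs on which A's loop never terminates
-- (height > day_climb with a non-positive net gain per day).
def Pre_days_to_reach_height (height : Int) (day_climb : Int) (night_descent : Int) : Prop :=
  height ≤ day_climb ∨ night_descent < day_climb
instance (height : Int) (day_climb : Int) (night_descent : Int) : Decidable (Pre_days_to_reach_height height day_climb night_descent) := by unfold Pre_days_to_reach_height; infer_instance

def pvWitness_days_to_reach_height : Int × Int × Int := (10, 3, 1)

def Spec_days_to_reach_height (height : Int) (day_climb : Int) (night_descent : Int) (out : Int) : Prop := out = days_to_reach_height_alt height day_climb night_descent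
instance (height : Int) (day_climb : Int) (night_descent : Int) (out : Int) : Decidable (Spec_days_to_reach_height height day_climb night_descent out) := by unfold Spec_days_to_reach_height; infer_instance

-- ===== CLAIM =====
def Claim_equal_days_to_reach_height : Prop := ∀ (height : Int) (day_climb : Int) (night_descent : Int), Dom_days_to_reach_height height day_climb night_descent → Pre_days_to_reach_height height day_climb night_descent → Spec_days_to_reach_height height day_climb night_descent (days_to_reach_height height day_climb night_descent)

-- ===== LEMMAS AND PROOFS =====

-- steps still needed from current height `cur` (before the day's climb)
def stepsFrom (height day_climb night_descent cur : Int) : Int :=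
  if height ≤ cur + day_climb then 1
  else -(PySem.Int.floordiv (-(height - cur - day_climb)) (day_climb - night_descent)) + 1

lemma ceil_one {m net : Int} (h1 : 1 ≤ m) (h2 : m ≤ net) :
    -(PySem.Int.floordiv (-m) net) = 1 := by
  have hpos : 0 < net := lt_of_lt_of_le (by omega) h2
  rw [PySem.Int.neg_floordiv_neg_eq_iff_of_pos hpos]
  constructor <;> omega

lemma ceil_step {m net : Int} (hnet : 0 < net) (_hm : net < m) :
    -(PySem.Int.floordiv (-m) net) = -(PySem.Int.floordiv (-(m - net)) net) + 1 := by
  rw [PySem.Int.neg_floordiv_neg_eq_iff_of_pos hnet]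
  set q := -(PySem.Int.floordiv (-(m - net)) net) with hq
  have := (PySem.Int.neg_floordiv_neg_eq_iff_of_pos (a := m - net) hnet (q := q)).mp rfl
  constructor <;> nlinarith [this.1, this.2]

lemma daysLoop_eq (height day_climb night_descent : Int) :
    ∀ (n : Nat) (cur days : Int),
      (height ≤ cur + day_climb ∨ night_descent < day_climb) →
      (height - cur - day_climb).toNat < n →
      daysLoop height day_climb night_descent n cur days =
        days + stepsFrom height day_climb night_descent cur := by
  intro n
  induction n with
  | zero => intro cur days _ h; omega
  | succ n ih =>
    intro cur days hp hn
    simp only [daysLoop]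
    by_cases hdone : cur + day_climb ≥ height
    · rw [if_pos hdone]
      unfold stepsFrom
      rw [if_pos (by omega)]
    · rw [if_neg hdone]
      have hnet : night_descent < day_climb := by omega
      rw [ih (cur + day_climb - night_descent) (days + 1) (Or.inr hnet) (by omega)]
      unfold stepsFrom
      by_cases hle : height ≤ cur + day_climb - night_descent + day_climb
      · rw [if_pos hle, if_neg (by omega)]
        have := ceil_one (m := height - cur - day_climb)
          (net := day_climb - night_descent) (by omega) (by omega)
        linarith
      · rw [if_neg hle, if_neg (by omega)]
        have e : height - (cur + day_climb - night_descent) - day_climb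
            = (height - cur - day_climb) - (day_climb - night_descent) := by ring
        rw [e]
        have := ceil_step (m := height - cur - day_climb)
          (net := day_climb - night_descent) (by omega) (by omega)
        linarith

-- ===== VERDICT =====
theorem days_to_reach_height_spec : Claim_equal_days_to_reach_height := by
  intro height day_climb night_descent _ hpre
  unfold Spec_days_to_reach_height days_to_reach_height days_to_reach_height_alt
  rw [daysLoop_eq height day_climb night_descent _ 0 0
      (by unfold Pre_days_to_reach_height at hpre; omega) (by omega)]
  unfold stepsFrom
  by_cases h : height ≤ day_climb
  · rw [if_pos (by omega), if_pos h]; ring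
  · rw [if_neg (by omega), if_neg h]
    have h0 : height - 0 - day_climb = height - day_climb := by ring
    rw [h0]
    ring
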